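-- pv_equiv track=rewrite | github.com/pypi-data/pypi-mirror-229 | packages/revproxy/revproxy-0.10-py3-none-any.whl/revproxy/__init__.py | get_linux_network_config
-- ===== SOURCE A (Python) =====
-- def get_linux_network_config(
--     interfaces=("enx344b50000000", "eth0"),
--     networkprefix="nspace",
--     virtualnetworkprefix="veth",
--     ipprefix="192.168",
-- ):
--     networkprefixcounter = 0
--     virtualnetworkprefixcounter = 0
--     ipcounter = 1
--     allinterfaces = {}
--     for index, interface in enumerate(interfaces):
--         network_config_for_linux = {
--             "mynamespace": f"{networkprefix}{networkprefixcounter}",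
--             "virtual1": "veth0",
--             "virtual2": "veth1",
--             "ip0": f"{ipprefix}.{ipcounter}.1",
--             "ip1": f"{ipprefix}.{ipcounter}.1/24",
--             "ip2": f"{ipprefix}.{ipcounter}.0/24",
--             "ip3": f"{ipprefix}.{ipcounter}.2/24",
--             "interface": interface,
--         }
--
--         ipcounter += 1
--         network_config_for_linux[
--             "virtual1"
--         ] = f"{virtualnetworkprefix}{virtualnetworkprefixcounter}"
--         virtualnetworkprefixcounter += 1
--         network_config_for_linux[
--             "virtual2"
--         ] = f"{virtualnetworkprefix}{virtualnetworkprefixcounter}"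
--         virtualnetworkprefixcounter += 1
--         networkprefixcounter += 1
--         allinterfaces[index] = network_config_for_linux.copy()
--     return allinterfaces
-- ===== SOURCE B (Python) =====
-- def get_linux_network_config(
--     interfaces=("enx344b50000000", "eth0"),
--     networkprefix="nspace",
--     virtualnetworkprefix="veth",
--     ipprefix="192.168",
-- ):
--     # Staged construction: build each column of values in its own pass, pair up
--     # the 2n veth names with the iterator trick, then zip the columns together.
--     n = len(interfaces)
--     namespaces = [f"{networkprefix}{i}" for i in range(n)]
--     veths = [f"{virtualnetworkprefix}{k}" for k in range(2 * n)]
--     subnets = [f"{ipprefix}.{i}" for i in range(1, n + 1)]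
--     it = iter(veths)
--     vethpairs = list(zip(it, it))
--     return {
--         index: {
--             "mynamespace": ns,
--             "virtual1": v1,
--             "virtual2": v2,
--             "ip0": f"{sub}.1",
--             "ip1": f"{sub}.1/24",
--             "ip2": f"{sub}.0/24",
--             "ip3": f"{sub}.2/24",
--             "interface": itf,
--         }
--         for index, (ns, (v1, v2), sub, itf) in enumerate(
--             zip(namespaces, vethpairs, subnets, interfaces)
--         )
--     }
-- ===== Notes on version B (the rewrite author's own statement) =====
-- stated objective: alternative
-- what changed: Replaced the single pass that threads three running counters and overwrites placeholder dict values with a staged construction: separate passes build the namespace, veth and subnet columns, the 2n veth names are paired up adjacently, and the columns are zipped together into the per-interface dicts.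
import Mathlib
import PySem

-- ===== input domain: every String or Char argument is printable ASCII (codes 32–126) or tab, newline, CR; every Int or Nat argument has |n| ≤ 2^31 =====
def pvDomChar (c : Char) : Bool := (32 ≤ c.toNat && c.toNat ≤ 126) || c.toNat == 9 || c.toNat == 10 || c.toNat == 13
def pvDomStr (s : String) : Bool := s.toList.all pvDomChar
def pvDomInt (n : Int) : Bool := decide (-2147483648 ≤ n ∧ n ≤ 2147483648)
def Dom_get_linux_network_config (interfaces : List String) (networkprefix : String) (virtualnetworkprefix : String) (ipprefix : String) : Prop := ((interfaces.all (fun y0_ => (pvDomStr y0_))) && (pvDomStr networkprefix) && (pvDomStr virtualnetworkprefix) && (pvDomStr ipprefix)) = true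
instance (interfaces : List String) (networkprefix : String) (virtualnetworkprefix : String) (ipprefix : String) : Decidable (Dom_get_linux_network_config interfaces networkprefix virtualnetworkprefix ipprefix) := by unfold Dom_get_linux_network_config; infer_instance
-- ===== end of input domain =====

-- B replaces A's single pass threading three counters (and its placeholder-then-overwrite
-- dict) by a staged construction: column lists built in separate passes, veths paired up,
-- columns zipped into the per-interface dicts (alternative decomposition, same cost).

-- ===== PORT A =====
-- loop body of A: state = (networkprefixcounter, virtualnetworkprefixcounter, ipcounter, allinterfaces)
def pvAStep (networkprefix virtualnetworkprefix ipprefix : String)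
    (st : Int × Int × Int × PySem.Dict Int (PySem.Dict String String))
    (p : Int × String) : Int × Int × Int × PySem.Dict Int (PySem.Dict String String) :=
  let npc := st.1; let vpc := st.2.1; let ipc := st.2.2.1; let all := st.2.2.2
  let cfg : PySem.Dict String String := PySem.Dict.ofList
    [ ("mynamespace", networkprefix ++ PySem.Int.toStr npc),
      ("virtual1", "veth0"),
      ("virtual2", "veth1"),
      ("ip0", ipprefix ++ "." ++ PySem.Int.toStr ipc ++ ".1"),
      ("ip1", ipprefix ++ "." ++ PySem.Int.toStr ipc ++ ".1/24"),
      ("ip2", ipprefix ++ "." ++ PySem.Int.toStr ipc ++ ".0/24"),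
      ("ip3", ipprefix ++ "." ++ PySem.Int.toStr ipc ++ ".2/24"),
      ("interface", p.2) ]
  let ipc := ipc + 1
  let cfg := cfg.insert "virtual1" (virtualnetworkprefix ++ PySem.Int.toStr vpc)
  let vpc := vpc + 1
  let cfg := cfg.insert "virtual2" (virtualnetworkprefix ++ PySem.Int.toStr vpc)
  let vpc := vpc + 1
  let npc := npc + 1
  (npc, vpc, ipc, all.insert p.1 cfg)

def get_linux_network_config (interfaces : List String) (networkprefix : String) (virtualnetworkprefix : String) (ipprefix : String) : List (Int × List (String × String)) :=
  let fin := (PySem.List.enumerate interfaces 0).foldl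
    (pvAStep networkprefix virtualnetworkprefix ipprefix) (0, 0, 1, PySem.Dict.empty)
  fin.2.2.2.items.map (fun q => (q.1, q.2.items))

-- ===== PORT B =====
-- list(zip(it, it)) on an iterator: pairs up adjacent elements
def pvPairUp {α : Type} : List α → List (α × α)
  | a :: b :: rest => (a, b) :: pvPairUp rest
  | _ => []

def get_linux_network_config_alt (interfaces : List String) (networkprefix : String) (virtualnetworkprefix : String) (ipprefix : String) : List (Int × List (String × String)) :=
  let n : Int := interfaces.length
  let namespaces := (PySem.List.pyRange 0 n 1).map (fun i => networkprefix ++ PySem.Int.toStr i)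
  let veths := (PySem.List.pyRange 0 (2 * n) 1).map (fun k => virtualnetworkprefix ++ PySem.Int.toStr k)
  let subnets := (PySem.List.pyRange 1 (n + 1) 1).map (fun i => ipprefix ++ "." ++ PySem.Int.toStr i)
  let vethpairs := pvPairUp veths
  (PySem.List.enumerate (namespaces.zip (vethpairs.zip (subnets.zip interfaces))) 0).map
    (fun p => (p.1,
      [ ("mynamespace", p.2.1),
        ("virtual1", p.2.2.1.1),
        ("virtual2", p.2.2.1.2),
        ("ip0", p.2.2.2.1 ++ ".1"),
        ("ip1", p.2.2.2.1 ++ ".1/24"),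
        ("ip2", p.2.2.2.1 ++ ".0/24"),
        ("ip3", p.2.2.2.1 ++ ".2/24"),
        ("interface", p.2.2.2.2) ]))

-- ===== PRECONDITION & SPEC =====
def Spec_get_linux_network_config (interfaces : List String) (networkprefix : String) (virtualnetworkprefix : String) (ipprefix : String) (out : List (Int × List (String × String))) : Prop := out = get_linux_network_config_alt interfaces networkprefix virtualnetworkprefix ipprefix
instance (interfaces : List String) (networkprefix : String) (virtualnetworkprefix : String) (ipprefix : String) (out : List (Int × List (String × String))) : Decidable (Spec_get_linux_network_config interfaces networkprefix virtualnetworkprefix ipprefix out) := by unfold Spec_get_linux_network_config; infer_instance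

-- ===== CLAIM (what is proved, stated in full; the proofs are below) =====
def Claim_equal_get_linux_network_config : Prop := ∀ (interfaces : List String) (networkprefix : String) (virtualnetworkprefix : String) (ipprefix : String), Dom_get_linux_network_config interfaces networkprefix virtualnetworkprefix ipprefix → Spec_get_linux_network_config interfaces networkprefix virtualnetworkprefix ipprefix (get_linux_network_config interfaces networkprefix virtualnetworkprefix ipprefix)

-- ===== LEMMAS AND PROOFS =====

-- reference form both sides are reduced to: the entry for (index, interface)
def pvEntry (networkprefix virtualnetworkprefix ipprefix : String) (p : Int × String) :
    Int × List (String × String) :=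
  (p.1,
    [ ("mynamespace", networkprefix ++ PySem.Int.toStr p.1),
      ("virtual1", virtualnetworkprefix ++ PySem.Int.toStr (2 * p.1)),
      ("virtual2", virtualnetworkprefix ++ PySem.Int.toStr (2 * p.1 + 1)),
      ("ip0", ipprefix ++ "." ++ PySem.Int.toStr (p.1 + 1) ++ ".1"),
      ("ip1", ipprefix ++ "." ++ PySem.Int.toStr (p.1 + 1) ++ ".1/24"),
      ("ip2", ipprefix ++ "." ++ PySem.Int.toStr (p.1 + 1) ++ ".0/24"),
      ("ip3", ipprefix ++ "." ++ PySem.Int.toStr (p.1 + 1) ++ ".2/24"),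
      ("interface", p.2) ])

-- building a Dict from a literal association list with distinct keys keeps the list as items
theorem pv_items_ofList {ν : Type} (l : List (String × ν)) (hn : (l.map Prod.fst).Nodup) :
    (PySem.Dict.ofList l).items = l := by
  have h0 : PySem.Dict.ofList l = l.foldl (fun d p => d.insert p.1 p.2) PySem.Dict.empty := rfl
  have he : PySem.Dict.empty.items = ([] : List (String × ν)) := rfl
  rw [h0, PySem.Dict.items_foldl_insert_fresh]
  · simp [he]
  · simp
  · exact hn

-- overwriting the two placeholder values keeps the key positions (Python: overwrite keeps position)
theorem pv_cfg_eq (A V0 V1' B C D E F v1 v2 : String) :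
    (((PySem.Dict.ofList [("mynamespace",A),("virtual1",V0),("virtual2",V1'),("ip0",B),("ip1",C),("ip2",D),("ip3",E),("interface",F)]).insert "virtual1" v1).insert "virtual2" v2)
      = PySem.Dict.ofList [("mynamespace",A),("virtual1",v1),("virtual2",v2),("ip0",B),("ip1",C),("ip2",D),("ip3",E),("interface",F)] := by
  have h0 := pv_items_ofList [("mynamespace",A),("virtual1",V0),("virtual2",V1'),("ip0",B),("ip1",C),("ip2",D),("ip3",E),("interface",F)] (by simp)
  have h1 := pv_items_ofList [("mynamespace",A),("virtual1",v1),("virtual2",v2),("ip0",B),("ip1",C),("ip2",D),("ip3",E),("interface",F)] (by simp)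
  have hk : (PySem.Dict.ofList [("mynamespace",A),("virtual1",V0),("virtual2",V1'),("ip0",B),("ip1",C),("ip2",D),("ip3",E),("interface",F)]).keys
      = ["mynamespace","virtual1","virtual2","ip0","ip1","ip2","ip3","interface"] := by
    simp only [PySem.Dict.keys]; rw [h0]; simp
  have hc1 : (PySem.Dict.ofList [("mynamespace",A),("virtual1",V0),("virtual2",V1'),("ip0",B),("ip1",C),("ip2",D),("ip3",E),("interface",F)]).contains "virtual1" = true :=
    (PySem.Dict.contains_iff_mem_keys _ _).mpr (by rw [hk]; decide)
  have hc2 : ((PySem.Dict.ofList [("mynamespace",A),("virtual1",V0),("virtual2",V1'),("ip0",B),("ip1",C),("ip2",D),("ip3",E),("interface",F)]).insert "virtual1" v1).contains "virtual2" = true := by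
    rw [PySem.Dict.contains_insert]
    have : (PySem.Dict.ofList [("mynamespace",A),("virtual1",V0),("virtual2",V1'),("ip0",B),("ip1",C),("ip2",D),("ip3",E),("interface",F)]).contains "virtual2" = true :=
      (PySem.Dict.contains_iff_mem_keys _ _).mpr (by rw [hk]; decide)
    simp [this]
  apply PySem.Dict.ext
  rw [PySem.Dict.items_insert_of_contains _ _ hc2, PySem.Dict.items_insert_of_contains _ _ hc1, h0, h1]
  simp

-- one step of A's loop at index s, from the invariant state (s, 2*s, s+1, d)
theorem pvAStep_eq (np vp ip : String) (s : Int) (x : String)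
    (d : PySem.Dict Int (PySem.Dict String String)) :
    pvAStep np vp ip (s, 2 * s, s + 1, d) (s, x)
      = (s + 1, 2 * (s + 1), (s + 1) + 1,
         d.insert s (PySem.Dict.ofList
           [ ("mynamespace", np ++ PySem.Int.toStr s),
             ("virtual1", vp ++ PySem.Int.toStr (2 * s)),
             ("virtual2", vp ++ PySem.Int.toStr (2 * s + 1)),
             ("ip0", ip ++ "." ++ PySem.Int.toStr (s + 1) ++ ".1"),
             ("ip1", ip ++ "." ++ PySem.Int.toStr (s + 1) ++ ".1/24"),
             ("ip2", ip ++ "." ++ PySem.Int.toStr (s + 1) ++ ".0/24"),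
             ("ip3", ip ++ "." ++ PySem.Int.toStr (s + 1) ++ ".2/24"),
             ("interface", x) ])) := by
  simp only [pvAStep]
  have h1 : 2 * s + 1 + 1 = 2 * (s + 1) := by ring
  rw [h1]
  exact congrArg (fun c => ((s + 1 : Int), (2 * (s + 1) : Int), ((s + 1) + 1 : Int), d.insert s c))
    (pv_cfg_eq _ _ _ _ _ _ _ _ _ _)

-- loop invariant: from state (s, 2*s, s+1, d), A's fold appends exactly the reference entries
theorem pvFold_inv (np vp ip : String) (xs : List String) (s : Int)
    (d : PySem.Dict Int (PySem.Dict String String))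
    (hd : ∀ k ∈ d.keys, k < s) :
    ((PySem.List.enumerate xs s).foldl (pvAStep np vp ip)
        (s, 2 * s, s + 1, d)).2.2.2.items.map (fun q => (q.1, q.2.items))
      = d.items.map (fun q => (q.1, q.2.items))
        ++ (PySem.List.enumerate xs s).map (pvEntry np vp ip) := by
  induction xs generalizing s d with
  | nil => simp [PySem.List.enumerate_nil]
  | cons x rest ih =>
    rw [PySem.List.enumerate_cons]
    simp only [List.foldl_cons, List.map_cons]
    rw [pvAStep_eq]
    have hnc : d.contains s = false := by
      cases hb : d.contains s with
      | false => rfl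
      | true =>
        exact absurd (hd s ((PySem.Dict.contains_iff_mem_keys _ _).mp hb)) (lt_irrefl s)
    rw [ih (s + 1) _ (by
      intro k hk
      rcases (PySem.Dict.mem_keys_insert _ _ _ _).mp hk with h | h
      · omega
      · have := hd k h; omega)]
    rw [PySem.Dict.items_insert_of_not_contains _ _ hnc]
    have hil := pv_items_ofList
      [("mynamespace", np ++ PySem.Int.toStr s), ("virtual1", vp ++ PySem.Int.toStr (2 * s)),
       ("virtual2", vp ++ PySem.Int.toStr (2 * s + 1)), ("ip0", ip ++ "." ++ PySem.Int.toStr (s + 1) ++ ".1"),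
       ("ip1", ip ++ "." ++ PySem.Int.toStr (s + 1) ++ ".1/24"), ("ip2", ip ++ "." ++ PySem.Int.toStr (s + 1) ++ ".0/24"),
       ("ip3", ip ++ "." ++ PySem.Int.toStr (s + 1) ++ ".2/24"), ("interface", x)] (by simp)
    simp [pvEntry, hil]

-- pvPairUp halves the length
theorem pvPairUp_length {α : Type} (l : List α) : (pvPairUp l).length = l.length / 2 := by
  induction l using pvPairUp.induct with
  | case1 a b rest ih => simp [pvPairUp, ih]; omega
  | case2 l h => cases l with
    | nil => simp [pvPairUp]
    | cons a t => cases t with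
      | nil => simp [pvPairUp]
      | cons b r => exact absurd rfl (h a b r)

-- pvPairUp picks adjacent elements
theorem pvPairUp_getElem {α : Type} (l : List α) (k : Nat) (h : 2 * k + 1 < l.length)
    (hk : k < (pvPairUp l).length) :
    (pvPairUp l)[k] = (l[2 * k]'(by omega), l[2 * k + 1]'h) := by
  induction l using pvPairUp.induct generalizing k with
  | case1 a b rest ih =>
    cases k with
    | zero => simp [pvPairUp]
    | succ m =>
      have h' : 2 * m + 1 < rest.length := by simp at h; omega
      have hk' : m < (pvPairUp rest).length := by simp [pvPairUp] at hk; omega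
      simp only [pvPairUp, List.getElem_cons_succ]
      rw [ih m h' hk']
      have h2 : 2 * (m + 1) = 2 * m + 1 + 1 := by ring
      simp only [h2, List.getElem_cons_succ]
  | case2 l hno =>
    exfalso
    cases l with
    | nil => simp at h
    | cons a t => cases t with
      | nil => simp at h
      | cons b r => exact hno a b r rfl

-- B's staged zip pipeline equals the reference mapped entries
theorem pvAlt_eq (np vp ip : String) (xs : List String) :
    get_linux_network_config_alt xs np vp ip
      = (PySem.List.enumerate xs 0).map (pvEntry np vp ip) := by
  unfold get_linux_network_config_alt
  set n : Int := (xs.length : Int) with hn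
  have hnames : ((PySem.List.pyRange 0 n 1).map (fun i => np ++ PySem.Int.toStr i)).length = xs.length := by
    simp [PySem.List.length_pyRange_one, hn]
  have hveths : ((PySem.List.pyRange 0 (2 * n) 1).map (fun k => vp ++ PySem.Int.toStr k)).length = 2 * xs.length := by
    simp [PySem.List.length_pyRange_one, hn]; omega
  have hsub : ((PySem.List.pyRange 1 (n + 1) 1).map (fun i => ip ++ "." ++ PySem.Int.toStr i)).length = xs.length := by
    simp [PySem.List.length_pyRange_one, hn]
  have hpairs : (pvPairUp ((PySem.List.pyRange 0 (2 * n) 1).map (fun k => vp ++ PySem.Int.toStr k))).length = xs.length := by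
    rw [pvPairUp_length, hveths]; omega
  have hziplen : (((PySem.List.pyRange 0 n 1).map (fun i => np ++ PySem.Int.toStr i)).zip
      ((pvPairUp ((PySem.List.pyRange 0 (2 * n) 1).map (fun k => vp ++ PySem.Int.toStr k))).zip
        (((PySem.List.pyRange 1 (n + 1) 1).map (fun i => ip ++ "." ++ PySem.Int.toStr i)).zip xs))).length = xs.length := by
    simp [List.length_zip, hnames, hpairs, hsub]
  apply List.ext_getElem
  · simp [PySem.List.length_enumerate, hziplen]
  intro k h1 h2
  have hkx : k < xs.length := by
    simp [PySem.List.length_enumerate, hziplen] at h1; exact h1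
  rw [List.getElem_map, List.getElem_map, PySem.List.getElem_enumerate, PySem.List.getElem_enumerate]
  rw [List.getElem_zip, List.getElem_zip, List.getElem_zip]
  rw [pvPairUp_getElem _ k (by omega) (by omega)]
  simp only [List.getElem_map, PySem.List.getElem_pyRange_one, pvEntry]
  have e1 : (0:Int) + ((2 * k : Nat) : Int) = 2 * ((0:Int) + (k : Int)) := by push_cast; ring
  have e2 : (0:Int) + ((2 * k + 1 : Nat) : Int) = 2 * ((0:Int) + (k : Int)) + 1 := by push_cast; ring
  have e3 : (1:Int) + (k : Int) = (0:Int) + (k : Int) + 1 := by ring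
  rw [e1, e2, e3]

-- ===== VERDICT (by name: the statement is the Claim_ definition above) =====
theorem get_linux_network_config_spec : Claim_equal_get_linux_network_config := by
  intro interfaces np vp ip _
  unfold Spec_get_linux_network_config get_linux_network_config
  rw [pvAlt_eq]
  have h := pvFold_inv np vp ip interfaces 0 PySem.Dict.empty (by simp [PySem.Dict.keys_empty])
  simpa using h
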